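-- pv_equiv track=rewrite | github.com/dionisio35/graph_plotting | src/plot_methods.py | _get_posmin_posmax_neqmin_neqmax
-- ===== SOURCE A (Python) =====
-- def _get_posmin_posmax_neqmin_neqmax(l:list):
--     '''
--     Get the positive and a negative min and max of a list
--     :param l: List
--     :return: Position of the min, position of the max, position of the min < 0, position of the max < 0
--     :rtype: tuple
--     '''
--     posmin= 2^31
--     posmax= 0
--     neqmin= 0
--     neqmax = -2^32
--     for i in range(len(l)):
--         if l[i] >= 0:
--             if l[i] < posmin:
--                 posmin= l[i]
--             if l[i] > posmax:
--                 posmax= l[i]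
--         else:
--             if l[i] < neqmin:
--                 neqmin= l[i]
--             if l[i] > neqmax:
--                 neqmax= l[i]
--     return posmin, posmax, neqmin, neqmax
-- ===== SOURCE B (Python) =====
-- def _get_posmin_posmax_neqmin_neqmax(l: list):
--     '''
--     Get the positive and a negative min and max of a list
--     '''
--     nonneg = [x for x in l if x >= 0]
--     neg = [x for x in l if x < 0]
--     # seed each reduction with the function's initial bounds
--     return (min([2 ^ 31, *nonneg]),
--             max([0, *nonneg]),
--             min([0, *neg]),
--             max([-2 ^ 32, *neg]))
-- ===== Notes on version B (the rewrite author's own statement) =====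
-- stated objective: simpler
-- what changed: Replaces the manual four-way running-extrema loop with a partition into nonnegative/negative sublists followed by builtin min/max reductions, each seeded with the function's initial bound constants.
import Mathlib
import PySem

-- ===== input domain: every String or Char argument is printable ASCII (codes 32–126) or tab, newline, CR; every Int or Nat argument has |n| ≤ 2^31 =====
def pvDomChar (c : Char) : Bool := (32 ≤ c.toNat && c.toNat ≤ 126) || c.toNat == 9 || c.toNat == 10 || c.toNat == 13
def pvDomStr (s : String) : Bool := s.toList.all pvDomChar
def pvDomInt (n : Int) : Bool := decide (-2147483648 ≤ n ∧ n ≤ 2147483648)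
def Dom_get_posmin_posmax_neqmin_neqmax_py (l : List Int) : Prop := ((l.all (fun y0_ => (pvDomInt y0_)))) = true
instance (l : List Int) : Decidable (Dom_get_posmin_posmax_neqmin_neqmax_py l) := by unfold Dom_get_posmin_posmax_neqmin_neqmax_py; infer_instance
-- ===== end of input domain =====

-- B replaces A's manual four-way running-extrema loop with a partition into
-- nonnegative/negative sublists followed by builtin min/max reductions seeded
-- with the function's initial bound constants (objective: simpler).


-- ===== PORT A =====
-- one loop step of A: the two independent ifs in each branch, in source order
def pvStepA (s : Int × Int × Int × Int) (x : Int) : Int × Int × Int × Int :=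
  let (pmin, pmax, nmin, nmax) := s
  if x ≥ 0 then
    let pmin := if x < pmin then x else pmin
    let pmax := if x > pmax then x else pmax
    (pmin, pmax, nmin, nmax)
  else
    let nmin := if x < nmin then x else nmin
    let nmax := if x > nmax then x else nmax
    (pmin, pmax, nmin, nmax)

-- Python's ^ is xor: the initializers 2 ^ 31 and -2 ^ 32 are bxor terms
def get_posmin_posmax_neqmin_neqmax_py (l : List Int) : Int × Int × Int × Int :=
  (PySem.List.pyRange 0 (PySem.List.len l) 1).foldl
    (fun s i => pvStepA s (PySem.List.pyGetD l i 0))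
    (PySem.Int.bxor 2 31, 0, 0, PySem.Int.bxor (-2) 32)

-- ===== PORT B =====
-- builtin min/max of a nonempty literal list [seed, *xs] (exact: list is never empty)
def pvMin1 (seed : Int) (xs : List Int) : Int :=
  (PySem.List.min? (seed :: xs) (fun y => y)).getD seed
def pvMax1 (seed : Int) (xs : List Int) : Int :=
  (PySem.List.max? (seed :: xs) (fun y => y)).getD seed

def get_posmin_posmax_neqmin_neqmax_py_alt (l : List Int) : Int × Int × Int × Int :=
  let nonneg := l.filter (fun x => decide (x ≥ 0))
  let neg := l.filter (fun x => decide (x < 0))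
  (pvMin1 (PySem.Int.bxor 2 31) nonneg, pvMax1 0 nonneg,
   pvMin1 0 neg, pvMax1 (PySem.Int.bxor (-2) 32) neg)

-- ===== PRECONDITION & SPEC =====
def Spec_get_posmin_posmax_neqmin_neqmax_py (l : List Int) (out : Int × Int × Int × Int) : Prop := out = get_posmin_posmax_neqmin_neqmax_py_alt l
instance (l : List Int) (out : Int × Int × Int × Int) : Decidable (Spec_get_posmin_posmax_neqmin_neqmax_py l out) := by unfold Spec_get_posmin_posmax_neqmin_neqmax_py; infer_instance

-- ===== CLAIM (what is proved, stated in full; the proofs are below) =====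
def Claim_equal_get_posmin_posmax_neqmin_neqmax_py : Prop := ∀ (l : List Int), Dom_get_posmin_posmax_neqmin_neqmax_py l → Spec_get_posmin_posmax_neqmin_neqmax_py l (get_posmin_posmax_neqmin_neqmax_py l)

-- ===== LEMMAS AND PROOFS =====

-- builtin min/max of [seed, *xs] is the running fold from seed
theorem pvMin1_eq (seed : Int) (xs : List Int) : pvMin1 seed xs = xs.foldl min seed := by
  simp [pvMin1, PySem.List.min?_id_cons]
theorem pvMax1_eq (seed : Int) (xs : List Int) : pvMax1 seed xs = xs.foldl max seed := by
  simp [pvMax1, PySem.List.max?_id_cons]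

-- loop invariant: folding A's step equals the four partitioned reductions
theorem pvStepA_fold (l : List Int) (pmin pmax nmin nmax : Int) :
    l.foldl pvStepA (pmin, pmax, nmin, nmax) =
      ((l.filter (fun x => decide (x ≥ 0))).foldl min pmin,
       (l.filter (fun x => decide (x ≥ 0))).foldl max pmax,
       (l.filter (fun x => decide (x < 0))).foldl min nmin,
       (l.filter (fun x => decide (x < 0))).foldl max nmax) := by
  induction l generalizing pmin pmax nmin nmax with
  | nil => simp
  | cons x t ih =>
    by_cases hx : x ≥ 0
    · have h1 : (if x < pmin then x else pmin) = min pmin x := by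
        simp [min_def]; split_ifs <;> omega
      have h2 : (if x > pmax then x else pmax) = max pmax x := by
        simp [max_def]; split_ifs <;> omega
      simp [pvStepA, hx, not_lt.mpr hx, ih, h1, h2]
    · have h1 : (if x < nmin then x else nmin) = min nmin x := by
        simp [min_def]; split_ifs <;> omega
      have h2 : (if x > nmax then x else nmax) = max nmax x := by
        simp [max_def]; split_ifs <;> omega
      simp [pvStepA, hx, lt_of_not_ge hx, ih, h1, h2]

-- ===== VERDICT (by name: the statement is the Claim_ definition above) =====
theorem get_posmin_posmax_neqmin_neqmax_py_spec : Claim_equal_get_posmin_posmax_neqmin_neqmax_py := by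
  intro l _
  show _ = _
  rw [get_posmin_posmax_neqmin_neqmax_py]
  rw [PySem.List.foldl_pyRange_pyGetD l 0 pvStepA (_, _, _, _) (le_refl 0)]
  simp [pvStepA_fold, get_posmin_posmax_neqmin_neqmax_py_alt, pvMin1_eq, pvMax1_eq]
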